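-- pv_equiv track=rewrite | github.com/dimamik/AGH_Algorithms_and_data_structures | LATO_FOR_EXAM/Hackerrank/Greedy/Grid_Challenge.py | luckBalance
-- ===== SOURCE A (Python) =====
-- def luckBalance(k, contests):
--     contests=sorted(contests,reverse=True)
--     luck = 0
--     for i in range(len(contests)):
--         if (contests[i][1] == 0):
--             luck += contests[i][0]
--         elif (k > 0):
--             k -= 1
--             luck += contests[i][0]
--         else:
--             luck -= contests[i][0]
--     return luck
-- ===== SOURCE B (Python) =====
-- def luckBalance(k, contests):
--     # One pass partitions: bank unimportant luck, provisionally lose every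
--     # important contest; then win back the k largest important lucks (2*v each).
--     luck = 0
--     important = []
--     for c in contests:
--         if c[1] == 0:
--             luck += c[0]
--         else:
--             important.append(c[0])
--             luck -= c[0]
--     important.sort()
--     for v in important[max(len(important) - k, 0):]:
--         luck += 2 * v
--     return luck
-- ===== Notes on version B (the rewrite author's own statement) =====
-- stated objective: alternative
-- what changed: A lexicographically sorts the whole contest list descending and runs a stateful loop that counts down k; B makes one partition pass (banking unimportant luck and provisionally losing every important contest), sorts only the important luck values ascending, and wins back the k largest with a closed-form 2*v addback.
import Mathlib
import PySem

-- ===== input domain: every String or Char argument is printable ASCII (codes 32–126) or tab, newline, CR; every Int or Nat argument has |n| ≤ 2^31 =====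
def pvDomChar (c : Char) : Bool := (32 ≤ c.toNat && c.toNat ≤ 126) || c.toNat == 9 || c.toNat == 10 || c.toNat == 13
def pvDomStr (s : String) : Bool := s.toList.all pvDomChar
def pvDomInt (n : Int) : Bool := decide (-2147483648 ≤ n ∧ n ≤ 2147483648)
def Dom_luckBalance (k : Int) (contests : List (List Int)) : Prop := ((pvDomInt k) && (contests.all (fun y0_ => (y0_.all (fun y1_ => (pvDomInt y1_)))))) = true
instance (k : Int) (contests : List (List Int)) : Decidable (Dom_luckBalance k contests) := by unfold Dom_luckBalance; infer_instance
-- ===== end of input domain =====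

-- B replaces A's lexicographic sort of the whole contest list plus a stateful k-countdown
-- loop by one partition pass, an ascending sort of the important luck values only, and a
-- 2*v win-back over the k largest of them (objective: alternative decomposition).

-- ===== PORT A =====
-- A's loop body: contests[i][1]==0 → gain; important and k budget left → gain, k -= 1; else lose.
def pvStepA (st : Int × Int) (c : List Int) : Int × Int :=
  if PySem.List.pyGetD c 1 0 == 0 then (st.1, st.2 + PySem.List.pyGetD c 0 0)
  else if st.1 > 0 then (st.1 - 1, st.2 + PySem.List.pyGetD c 0 0)
  else (st.1, st.2 - PySem.List.pyGetD c 0 0)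

-- sorted(contests, reverse=True): Python's lexicographic list comparison is the Lex order
-- of List.instLinearOrder, passed explicitly (core's List.instLT is the same relation).
def luckBalance (k : Int) (contests : List (List Int)) : Int :=
  let contests2 := @PySem.List.sorted (List Int) (List Int) List.instLinearOrder.toLT
      LinearOrder.toDecidableLT contests (fun x => x) true
  ((PySem.List.pyRange 0 (contests2.length : Int) 1).foldl
      (fun st i => pvStepA st (PySem.List.pyGetD contests2 i [])) (k, 0)).2

-- ===== PORT B =====
-- B's partition pass: bank unimportant luck, provisionally lose every important contest,
-- collecting the important luck values.
def pvStepB (st : Int × List Int) (c : List Int) : Int × List Int :=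
  if PySem.List.pyGetD c 1 0 == 0 then (st.1 + PySem.List.pyGetD c 0 0, st.2)
  else (st.1 - PySem.List.pyGetD c 0 0, st.2 ++ [PySem.List.pyGetD c 0 0])

def luckBalance_alt (k : Int) (contests : List (List Int)) : Int :=
  let st := contests.foldl pvStepB (0, [])
  let important := PySem.List.sorted st.2 (fun x => x) false
  (PySem.List.slice important (some (max ((important.length : Int) - k) 0)) none).foldl
    (fun luck v => luck + 2 * v) st.1

-- ===== PRECONDITION & SPEC =====
-- Pre_ excludes exactly the inputs where Python A raises IndexError: a contest row with
-- fewer than two entries (A reads contests[i][1]); B reads c[1] too and raises there as well.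
def Pre_luckBalance (k : Int) (contests : List (List Int)) : Prop :=
  ∀ c ∈ contests, 2 ≤ c.length
instance (k : Int) (contests : List (List Int)) : Decidable (Pre_luckBalance k contests) := by
  unfold Pre_luckBalance; infer_instance

def pvWitness_luckBalance : Int × List (List Int) := (2, [[5, 1], [3, 0], [1, 1], [4, 1]])

def Spec_luckBalance (k : Int) (contests : List (List Int)) (out : Int) : Prop :=
  out = luckBalance_alt k contests
instance (k : Int) (contests : List (List Int)) (out : Int) : Decidable (Spec_luckBalance k contests out) := by
  unfold Spec_luckBalance; infer_instance

-- ===== CLAIM (what is proved, stated in full; the proofs are below) =====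
def Claim_equal_luckBalance : Prop := ∀ (k : Int) (contests : List (List Int)),
  Dom_luckBalance k contests → Pre_luckBalance k contests →
  Spec_luckBalance k contests (luckBalance k contests)

-- ===== LEMMAS AND PROOFS =====

-- names for the ingredients both loops manipulate
def pvLuck0 (c : List Int) : Int := PySem.List.pyGetD c 0 0
def pvUnimp (c : List Int) : Bool := PySem.List.pyGetD c 1 0 == 0
def pvSumU (L : List (List Int)) : Int := ((L.filter pvUnimp).map pvLuck0).sum
def pvIlist (L : List (List Int)) : List Int := (L.filter (fun c => !pvUnimp c)).map pvLuck0

-- B's first pass computes (sum of unimportant − sum of important, important lucks in order)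
lemma loopB_char (L : List (List Int)) (l0 : Int) (acc : List Int) :
    L.foldl pvStepB (l0, acc) = (l0 + pvSumU L - (pvIlist L).sum, acc ++ pvIlist L) := by
  induction L generalizing l0 acc with
  | nil => simp [pvSumU, pvIlist]
  | cons c L ih =>
    simp only [List.foldl_cons, pvStepB]
    by_cases h : pvUnimp c = true
    · rw [if_pos (by simpa [pvUnimp] using h), ih]
      simp [pvSumU, pvIlist, List.filter_cons, h, pvLuck0]
      ring
    · simp only [Bool.not_eq_true] at h
      rw [if_neg (by simpa [pvUnimp] using h), ih]
      simp [pvSumU, pvIlist, List.filter_cons, h, pvLuck0]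
      ring

-- A's loop: unimportant lucks gained; the first k important ones gained, the rest lost
lemma loopA_char (L : List (List Int)) (k luck : Int) :
    (L.foldl pvStepA (k, luck)).2 =
      luck + pvSumU L + ((pvIlist L).take k.toNat).sum - ((pvIlist L).drop k.toNat).sum := by
  induction L generalizing k luck with
  | nil => simp [pvSumU, pvIlist]
  | cons c L ih =>
    simp only [List.foldl_cons, pvStepA]
    by_cases h : pvUnimp c = true
    · rw [if_pos (by simpa [pvUnimp] using h), ih]
      simp [pvSumU, pvIlist, List.filter_cons, h, pvLuck0]
      ring
    · simp only [Bool.not_eq_true] at h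
      by_cases hk : k > 0
      · rw [if_neg (by simpa [pvUnimp] using h), if_pos (by simpa using hk), ih]
        have ht : k.toNat = (k - 1).toNat + 1 := by omega
        rw [ht]
        simp [pvSumU, pvIlist, List.filter_cons, h, pvLuck0]
        ring
      · rw [if_neg (by simpa [pvUnimp] using h), if_neg (by simpa using hk), ih]
        have ht : k.toNat = 0 := by omega
        rw [ht]
        simp [pvSumU, pvIlist, List.filter_cons, h, pvLuck0]
        ring

-- heads of lex-comparable nonempty rows compare the same way
lemma head_mono (a b : List Int) (ha : a ≠ []) (hb : b ≠ []) (h : b ≤ a) :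
    pvLuck0 b ≤ pvLuck0 a := by
  obtain ⟨x, xs, rfl⟩ := List.exists_cons_of_ne_nil ha
  obtain ⟨y, ys, rfl⟩ := List.exists_cons_of_ne_nil hb
  by_contra hc
  have hc' : x < y := by
    simp only [pvLuck0, PySem.List.pyGetD_zero_cons] at hc; omega
  have h2 : (x :: xs : List Int) < (y :: ys) := List.Lex.rel hc'
  exact absurd (lt_of_lt_of_le h2 h) (lt_irrefl _)

-- the important lucks of A's sorted list = reverse of B's ascending sort of them
lemma ilist_sorted_eq (contests : List (List Int)) (hpre : ∀ c ∈ contests, 2 ≤ c.length) :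
    pvIlist (@PySem.List.sorted (List Int) (List Int) List.instLinearOrder.toLT
        LinearOrder.toDecidableLT contests (fun x => x) true) =
      (PySem.List.sorted (pvIlist contests) (fun x => x) false).reverse := by
  set S := @PySem.List.sorted (List Int) (List Int) List.instLinearOrder.toLT
      LinearOrder.toDecidableLT contests (fun x => x) true with hS
  have hpermS : S.Perm contests := @PySem.List.sorted_perm (List Int) (List Int)
    List.instLinearOrder.toLT LinearOrder.toDecidableLT contests (fun x => x) true
  have hperm : (pvIlist S).Perm (pvIlist contests) := (hpermS.filter _).map _
  have hpairS : S.Pairwise (fun a b : List Int => b ≤ a) :=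
    PySem.List.sorted_pairwise_rev contests (fun x => x)
  have hpairF : (S.filter (fun c => !pvUnimp c)).Pairwise (fun a b : List Int => b ≤ a) :=
    hpairS.filter _
  have hpair1 : (pvIlist S).Pairwise (fun a b : Int => b ≤ a) := by
    unfold pvIlist
    refine List.pairwise_map.mpr (hpairF.imp_of_mem ?_)
    intro a b hma hmb hle
    have ha : a ∈ contests := hpermS.mem_iff.mp (List.mem_of_mem_filter hma)
    have hb : b ∈ contests := hpermS.mem_iff.mp (List.mem_of_mem_filter hmb)
    exact head_mono a b (by have := hpre a ha; intro hn; simp [hn] at this)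
      (by have := hpre b hb; intro hn; simp [hn] at this) hle
  have hpair2 : ((PySem.List.sorted (pvIlist contests) (fun x => x) false).reverse).Pairwise
      (fun a b : Int => b ≤ a) := by
    rw [List.pairwise_reverse]
    exact PySem.List.sorted_pairwise (pvIlist contests) (fun x => x)
  refine List.Perm.eq_of_pairwise (fun a b _ _ h1 h2 => le_antisymm h2 h1) hpair1 hpair2 ?_
  exact hperm.trans ((PySem.List.sorted_perm (pvIlist contests) (fun x => x) false).symm.trans
    (List.reverse_perm _).symm)

-- sums over filtered/mapped lists are invariant under the sort
lemma sumU_sorted (contests : List (List Int)) :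
    pvSumU (@PySem.List.sorted (List Int) (List Int) List.instLinearOrder.toLT
        LinearOrder.toDecidableLT contests (fun x => x) true) = pvSumU contests :=
  (((@PySem.List.sorted_perm (List Int) (List Int) List.instLinearOrder.toLT
    LinearOrder.toDecidableLT contests (fun x => x) true).filter _).map _).sum_eq

-- ===== VERDICT (by name: the statement is the Claim_ definition above) =====
theorem luckBalance_spec : Claim_equal_luckBalance := by
  intro k contests _ hpre
  unfold Spec_luckBalance luckBalance luckBalance_alt
  simp only []
  rw [PySem.List.foldl_pyRange_pyGetD' _ _ pvStepA (k, 0) (le_refl 0)]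
  rw [Int.toNat_zero, List.drop_zero, loopA_char, loopB_char]
  rw [ilist_sorted_eq contests hpre, sumU_sorted]
  simp only [List.nil_append]
  set s := PySem.List.sorted (pvIlist contests) (fun x => x) false with hs
  have hsum : s.sum = (pvIlist contests).sum :=
    (PySem.List.sorted_perm (pvIlist contests) (fun x => x) false).sum_eq
  have hlen : s.length = (pvIlist contests).length :=
    (PySem.List.sorted_perm (pvIlist contests) (fun x => x) false).length_eq
  -- B's slice: important[max(len-k,0):] is drop (len - k.toNat)
  have hslice : PySem.List.slice s (some (max ((s.length : Int) - k) 0)) none =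
      s.drop (s.length - k.toNat) := by
    have hnn : ¬ (max ((s.length : Int) - k) 0 < 0) := by omega
    simp only [PySem.List.slice, PySem.List.clampIdx, hnn, if_neg hnn]
    have ha : min (max ((s.length : Int) - k) 0).toNat s.length = s.length - k.toNat := by
      omega
    rw [ha]
    exact List.take_of_length_le (by simp)
  rw [hslice, PySem.List.foldl_add _ (fun v => 2 * v)]
  rw [List.take_reverse, List.drop_reverse, List.sum_reverse, List.sum_reverse]
  have h2 : ((s.drop (s.length - k.toNat)).map (fun v => 2 * v)).sum =
      2 * (s.drop (s.length - k.toNat)).sum := by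
    simpa using List.sum_map_mul_left (s.drop (s.length - k.toNat)) (fun v => v) 2
  rw [h2]
  have h3 := List.sum_take_add_sum_drop s (s.length - k.toNat)
  omega
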